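-- pv_equiv track=rewrite | github.com/12ozCode/hairpin-proxy | hairpin-proxy-controller/src/main.py | coredns_corefile_with_rewrite_rules
-- ===== SOURCE A (Python) =====
-- COMMENT_LINE_SUFFIX = "# Added by hairpin-proxy"
--
-- DNS_REWRITE_DESTINATION = "hairpin-proxy.hairpin-proxy.svc.cluster.local"
--
-- def coredns_corefile_with_rewrite_rules(original_corefile, hosts):
--     """
--     Create a new CoreDNS Corefile with rewrite rules for the given hosts.
--     Previous rewrite lines added by this script are replaced.
--     """
--     # Remove any previously inserted rewrite lines
--     lines = [line for line in original_corefile.strip().splitlines()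
--              if not line.strip().endswith(COMMENT_LINE_SUFFIX)]
--
--     # Generate new rewrite lines
--     rewrite_lines = [
--         f"    rewrite name {host} {DNS_REWRITE_DESTINATION} {COMMENT_LINE_SUFFIX}"
--         for host in hosts
--     ]
--
--     # Find the ".:53 {" block to insert the rewrite lines into
--     try:
--         main_server_index = next(
--             i for i, line in enumerate(lines) if line.strip().startswith(".:53 {")
--         )
--     except StopIteration:
--         raise Exception("Can't find '.:53 {' in Corefile")
--
--     # Insert rewrite rules just below the ".:53 {" line
--     for i, rewrite in enumerate(rewrite_lines):
--         lines.insert(main_server_index + 1 + i, rewrite)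
--
--     return "\n".join(lines)
-- ===== SOURCE B (Python) =====
-- COMMENT_LINE_SUFFIX = "# Added by hairpin-proxy"
--
-- DNS_REWRITE_DESTINATION = "hairpin-proxy.hairpin-proxy.svc.cluster.local"
--
-- def coredns_corefile_with_rewrite_rules(original_corefile, hosts):
--     """Single-pass rewrite: filter, find and insert in one traversal."""
--     rewrite_lines = [
--         f"    rewrite name {host} {DNS_REWRITE_DESTINATION} {COMMENT_LINE_SUFFIX}"
--         for host in hosts
--     ]
--     out = []
--     inserted = False
--     for line in original_corefile.strip().splitlines():
--         if line.strip().endswith(COMMENT_LINE_SUFFIX):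
--             continue
--         out.append(line)
--         if not inserted and line.strip().startswith(".:53 {"):
--             out.extend(rewrite_lines)
--             inserted = True
--     if not inserted:
--         raise Exception("Can't find '.:53 {' in Corefile")
--     return "\n".join(out)
-- ===== Notes on version B (the rewrite author's own statement) =====
-- stated objective: simpler
-- what changed: B replaces A's three phases (filter comprehension, next()-based index search, then a loop of list.insert calls) with one single-pass loop over the split lines that skips comment lines, appends the rest, and splices the rewrite lines right after the first '.:53 {' line using an 'inserted' flag.
import Mathlib
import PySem

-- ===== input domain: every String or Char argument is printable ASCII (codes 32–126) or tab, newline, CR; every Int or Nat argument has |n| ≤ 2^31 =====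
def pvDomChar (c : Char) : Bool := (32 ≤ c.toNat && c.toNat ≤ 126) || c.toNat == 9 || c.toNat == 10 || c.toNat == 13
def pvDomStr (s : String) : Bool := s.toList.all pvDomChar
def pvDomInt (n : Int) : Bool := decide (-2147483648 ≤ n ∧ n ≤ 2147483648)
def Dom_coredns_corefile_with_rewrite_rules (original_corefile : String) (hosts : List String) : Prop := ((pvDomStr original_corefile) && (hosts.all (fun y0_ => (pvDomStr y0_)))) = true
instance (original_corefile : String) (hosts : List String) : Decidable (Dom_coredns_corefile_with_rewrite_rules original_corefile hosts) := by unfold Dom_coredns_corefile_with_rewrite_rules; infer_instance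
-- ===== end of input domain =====

-- B fuses A's three passes (filter, index search, insertion loop) into ONE traversal
-- with an 'inserted' flag; objective: simpler. Same return value on every input where A returns.

-- shared module constants
def pvSuffix : String := "# Added by hairpin-proxy"
def pvDest : String := "hairpin-proxy.hairpin-proxy.svc.cluster.local"
-- f"    rewrite name {host} {DNS_REWRITE_DESTINATION} {COMMENT_LINE_SUFFIX}"
def pvRewriteLine (host : String) : String :=
  PySem.Str.join "" ["    rewrite name ", host, " ", pvDest, " ", pvSuffix]

-- ===== PORT A =====
def coredns_corefile_with_rewrite_rules (original_corefile : String) (hosts : List String) : String :=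
  let lines := (PySem.Str.splitlines (PySem.Str.strip original_corefile)).filter
      (fun l => !(PySem.Str.endswith (PySem.Str.strip l) pvSuffix))
  let rewrite_lines := hosts.map pvRewriteLine
  match lines.findIdx? (fun l => PySem.Str.startswith (PySem.Str.strip l) ".:53 {") with
  | none => ""   -- Python raises Exception here; excluded by Pre_
  | some main_server_index =>
    let lines := (PySem.List.enumerate rewrite_lines).foldl
      (fun ls p => PySem.List.insert ls ((main_server_index : Int) + 1 + p.1) p.2) lines
    PySem.Str.join "\n" lines

-- ===== PORT B =====
-- the single loop of Source B: skip comment lines, append the rest, splice rewrites after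
-- the first '.:53 {' line ('inserted' flag)
def pvGoB (rws : List String) : List String → Bool → List String
  | [], _ => []
  | l :: rest, inserted =>
    if PySem.Str.endswith (PySem.Str.strip l) pvSuffix then pvGoB rws rest inserted
    else if !inserted && PySem.Str.startswith (PySem.Str.strip l) ".:53 {" then
      l :: (rws ++ pvGoB rws rest true)
    else l :: pvGoB rws rest inserted

def coredns_corefile_with_rewrite_rules_alt (original_corefile : String) (hosts : List String) : String :=
  let rewrite_lines := hosts.map pvRewriteLine
  PySem.Str.join "\n"
    (pvGoB rewrite_lines (PySem.Str.splitlines (PySem.Str.strip original_corefile)) false)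
  -- Python raises when no '.:53 {' line survives the filter; excluded by Pre_

-- ===== PRECONDITION & SPEC =====
-- Pre_ excludes exactly the inputs on which BOTH Pythons raise
-- Exception("Can't find '.:53 {' in Corefile"): no surviving line starts with '.:53 {'.
def Pre_coredns_corefile_with_rewrite_rules (original_corefile : String) (hosts : List String) : Prop :=
  ((PySem.Str.splitlines (PySem.Str.strip original_corefile)).filter
      (fun l => !(PySem.Str.endswith (PySem.Str.strip l) pvSuffix))).any
    (fun l => PySem.Str.startswith (PySem.Str.strip l) ".:53 {") = true
instance (original_corefile : String) (hosts : List String) : Decidable (Pre_coredns_corefile_with_rewrite_rules original_corefile hosts) := by unfold Pre_coredns_corefile_with_rewrite_rules; infer_instance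

def pvWitness_coredns_corefile_with_rewrite_rules : String × List String :=
  (".:53 {\n    forward . /etc/resolv.conf\n}", ["example.com"])

def Spec_coredns_corefile_with_rewrite_rules (original_corefile : String) (hosts : List String) (out : String) : Prop := out = coredns_corefile_with_rewrite_rules_alt original_corefile hosts
instance (original_corefile : String) (hosts : List String) (out : String) : Decidable (Spec_coredns_corefile_with_rewrite_rules original_corefile hosts out) := by unfold Spec_coredns_corefile_with_rewrite_rules; infer_instance

-- ===== CLAIM (what is proved, stated in full; the proofs are below) =====
def Claim_equal_coredns_corefile_with_rewrite_rules : Prop := ∀ (original_corefile : String) (hosts : List String), Dom_coredns_corefile_with_rewrite_rules original_corefile hosts → Pre_coredns_corefile_with_rewrite_rules original_corefile hosts → Spec_coredns_corefile_with_rewrite_rules original_corefile hosts (coredns_corefile_with_rewrite_rules original_corefile hosts)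

-- ===== LEMMAS AND PROOFS =====

-- A's insertion loop: inserting rws at consecutive positions starting at n splices rws in at n.
theorem pv_foldl_insert (rws : List String) : ∀ (ls : List String) (n : Nat) (s : Int),
    n ≤ ls.length →
    (PySem.List.enumerate rws s).foldl
        (fun ls p => PySem.List.insert ls ((n : Int) - s + p.1) p.2) ls
      = ls.take n ++ rws ++ ls.drop n := by
  induction rws with
  | nil => intro ls n s h; simp [PySem.List.enumerate]
  | cons r rws ih =>
    intro ls n s h
    rw [PySem.List.enumerate_cons, List.foldl_cons]
    have h1 : ((n : Int) - s + s) = (n : Nat) := by ring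
    rw [show ((n : Int) - s + s) = ((n : Nat) : Int) from h1,
        PySem.List.insert_natCast ls n r h]
    have hfn : (fun (ls : List String) (p : Int × String) =>
          PySem.List.insert ls ((n : Int) - s + p.1) p.2)
        = (fun ls p => PySem.List.insert ls (((n + 1 : Nat) : Int) - (s + 1) + p.1) p.2) := by
      funext ls p; congr 1; push_cast; ring
    rw [hfn, ih (ls.take n ++ r :: ls.drop n) (n + 1) (s + 1)
        (by simp; omega)]
    have htl : (ls.take n).length = n := by simp [h]
    rw [List.take_append, List.drop_append, htl]
    have e1 : List.take (n + 1) (ls.take n) = ls.take n :=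
      List.take_of_length_le (by omega)
    have e2 : List.drop (n + 1) (ls.take n) = [] :=
      List.drop_eq_nil_of_le (by omega)
    simp [e1, e2]

-- B's loop with the flag already set only filters the comment lines.
theorem pvGoB_true (rws : List String) : ∀ (ls : List String),
    pvGoB rws ls true
      = ls.filter (fun l => !(PySem.Str.endswith (PySem.Str.strip l) pvSuffix)) := by
  intro ls
  induction ls with
  | nil => rfl
  | cons l rest ih =>
    by_cases hc : PySem.Chars.endswith (PySem.Chars.strip l.toList) pvSuffix.toList
    · simp [pvGoB, hc, ih]
    · simp [pvGoB, hc, ih]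

-- B's loop with flag false = splice rws after the first matching surviving line.
theorem pvGoB_false (rws : List String) : ∀ (ls : List String) (idx : Nat),
    (ls.filter (fun l => !(PySem.Str.endswith (PySem.Str.strip l) pvSuffix))).findIdx?
        (fun l => PySem.Str.startswith (PySem.Str.strip l) ".:53 {") = some idx →
    pvGoB rws ls false
      = (ls.filter (fun l => !(PySem.Str.endswith (PySem.Str.strip l) pvSuffix))).take (idx + 1)
        ++ rws
        ++ (ls.filter (fun l => !(PySem.Str.endswith (PySem.Str.strip l) pvSuffix))).drop (idx + 1) := by
  intro ls
  induction ls with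
  | nil => intro idx h; simp at h
  | cons l rest ih =>
    intro idx h
    by_cases hc : PySem.Chars.endswith (PySem.Chars.strip l.toList) pvSuffix.toList
    · rw [List.filter_cons_of_neg (by simp [hc])] at h ⊢
      simpa [pvGoB, hc] using ih idx h
    · rw [List.filter_cons_of_pos (by simp [hc])] at h ⊢
      by_cases hp : PySem.Chars.startswith (PySem.Chars.strip l.toList) ['.', ':', '5', '3', ' ', '{']
      · rw [List.findIdx?_cons, if_pos (by simp [hp])] at h
        obtain rfl : (0 : Nat) = idx := Option.some.inj h
        simp [pvGoB, hc, hp, pvGoB_true]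
      · rw [List.findIdx?_cons, if_neg (by simp [hp])] at h
        obtain ⟨j, hj, rfl⟩ : ∃ j, _ ∧ idx = j + 1 := by
          cases hfi : List.findIdx? (fun l => PySem.Str.startswith (PySem.Str.strip l) ".:53 {")
              (rest.filter (fun l => !(PySem.Str.endswith (PySem.Str.strip l) pvSuffix))) with
          | none => rw [hfi] at h; simp at h
          | some j => rw [hfi] at h; simp at h; exact ⟨j, hfi, h.symm⟩
        simp [pvGoB, hc, hp, ih j hj, List.take_succ_cons, List.drop_succ_cons]

-- ===== VERDICT (by name: the statement is the Claim_ definition above) =====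
theorem coredns_corefile_with_rewrite_rules_spec : Claim_equal_coredns_corefile_with_rewrite_rules := by
  intro oc hosts _hdom hpre
  unfold Spec_coredns_corefile_with_rewrite_rules
  unfold coredns_corefile_with_rewrite_rules coredns_corefile_with_rewrite_rules_alt
  dsimp only
  set fl := (PySem.Str.splitlines (PySem.Str.strip oc)).filter
      (fun l => !(PySem.Str.endswith (PySem.Str.strip l) pvSuffix)) with hfl
  have hsome : (fl.findIdx? (fun l => PySem.Str.startswith (PySem.Str.strip l) ".:53 {")).isSome := by
    unfold Pre_coredns_corefile_with_rewrite_rules at hpre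
    rw [List.findIdx?_isSome]
    exact hpre
  obtain ⟨idx, hidx⟩ := Option.isSome_iff_exists.mp hsome
  rw [hidx]
  dsimp only
  have hlt : idx < fl.length := (List.findIdx?_eq_some_iff_findIdx_eq.mp hidx).1
  have hfold := pv_foldl_insert (hosts.map pvRewriteLine) fl (idx + 1) 0 (by omega)
  have hfn : (fun (ls : List String) (p : Int × String) =>
        PySem.List.insert ls ((idx : Int) + 1 + p.1) p.2)
      = (fun ls p => PySem.List.insert ls (((idx + 1 : Nat) : Int) - 0 + p.1) p.2) := by
    funext ls p
    have h' : ((idx : Int) + 1 + p.1) = (((idx + 1 : Nat) : Int) - 0 + p.1) := by push_cast; ring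
    rw [h']
  show PySem.Str.join "\n"
      ((PySem.List.enumerate (hosts.map pvRewriteLine)).foldl
        (fun ls p => PySem.List.insert ls ((idx : Int) + 1 + p.1) p.2) fl) = _
  rw [hfn, hfold, pvGoB_false (hosts.map pvRewriteLine) _ idx (hfl ▸ hidx)]
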